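-- pv_equiv track=rewrite | github.com/martaaoliveira/UA-Course-MIECT | 3rdyear/IA/TETRIS/tpg-tetris-ia_97613_98392-main/tpg-tetris-ia_97613_98392-main/student.py | get_all_possibilities_positions
-- ===== SOURCE A (Python) =====
-- class Tetris:
--     vectores_possibilities=[[0,1],[0,2],[0,3],[0,4],
--     [1,0],[1,1],[1,2],[1,3],[1,4],
--     [2,0],[2,1],[2,2],[2,3],[2,4],
--     [3,0],[3,1],[3,2],[3,3],[3,4],
--     [4,0],[4,1],[4,2],[4,3],[4,4],
--     [-1,0],[-1,1],[-1,2],[-1,3],[-1,4],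
--     [-2,0],[-2,1],[-2,2],[-2,3],[-2,4],
--     [-3,0],[-3,1],[-3,2],[-3,3],[-3,4],
--     [-4,0],[-4,1],[-4,2],[-4,3],[-4,4]]
--
-- def get_all_possibilities_positions(piece):
--     if(piece == None):
--         return None
--
--     positions=[piece]
--     for vector in Tetris.vectores_possibilities:
--         new_piece=[]
--         possible = True
--         for square in piece:
--             x = square[0] + vector[0]
--             y = square[1] + vector[1]
--             if(x < 0 or x >= 6 or y >= 6 or y < 0):
--                 possible = False
--                 break
--             else:
--                 new_piece+=[[x,y]]
--
--         if possible == True: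
--             positions += [new_piece]
--
--         new_piece=[]
--         possible = True
--         for square in piece:
--             x = square[0] - vector[0]
--             y = square[1] - vector[1]
--             if(x < 0 or x >= 6 or y >= 6 or y < 0):
--                 possible = False
--                 break
--             else:
--                 new_piece+=[[x,y]]
--         if possible == True:
--             positions += [new_piece]
--     return positions
-- ===== SOURCE B (Python) =====
-- VECTORS = [[0,1],[0,2],[0,3],[0,4],
--     [1,0],[1,1],[1,2],[1,3],[1,4],
--     [2,0],[2,1],[2,2],[2,3],[2,4],
--     [3,0],[3,1],[3,2],[3,3],[3,4],
--     [4,0],[4,1],[4,2],[4,3],[4,4],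
--     [-1,0],[-1,1],[-1,2],[-1,3],[-1,4],
--     [-2,0],[-2,1],[-2,2],[-2,3],[-2,4],
--     [-3,0],[-3,1],[-3,2],[-3,3],[-3,4],
--     [-4,0],[-4,1],[-4,2],[-4,3],[-4,4]]
--
-- def get_all_possibilities_positions(piece):
--     if piece is None:
--         return None
--     if piece:
--         xs = [s[0] for s in piece]
--         ys = [s[1] for s in piece]
--         minx, maxx = min(xs), max(xs)
--         miny, maxy = min(ys), max(ys)
--     positions = [piece]
--     for vector in VECTORS:
--         for sign in (1, -1):
--             dx, dy = sign * vector[0], sign * vector[1]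
--             if piece and not (0 <= minx + dx and maxx + dx < 6 and 0 <= miny + dy and maxy + dy < 6):
--                 continue
--             positions.append([[s[0] + dx, s[1] + dy] for s in piece])
--     return positions
-- ===== Notes on version B (the rewrite author's own statement) =====
-- stated objective: alternative
-- what changed: B computes the piece's bounding box once and validates each of the 88 candidate translations with a single interval check, instead of A's per-translation rescan of every square with an early break.
-- outside the precondition, e.g. on get_all_possibilities_positions([[10, 0], [5]]): A returns [[[10, 0], [5]]], B raises IndexError
import Mathlib
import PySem

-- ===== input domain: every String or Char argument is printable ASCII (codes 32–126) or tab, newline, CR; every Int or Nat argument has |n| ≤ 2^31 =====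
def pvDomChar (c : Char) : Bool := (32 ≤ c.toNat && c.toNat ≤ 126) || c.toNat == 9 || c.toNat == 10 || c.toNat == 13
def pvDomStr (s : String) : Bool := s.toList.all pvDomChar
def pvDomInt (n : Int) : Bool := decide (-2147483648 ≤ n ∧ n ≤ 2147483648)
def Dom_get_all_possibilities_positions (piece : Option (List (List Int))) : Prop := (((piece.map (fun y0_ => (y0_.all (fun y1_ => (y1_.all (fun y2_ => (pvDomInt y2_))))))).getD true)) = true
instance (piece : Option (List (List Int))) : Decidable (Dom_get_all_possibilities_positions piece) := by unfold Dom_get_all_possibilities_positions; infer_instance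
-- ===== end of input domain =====

-- Alternative implementation: B validates each candidate translation with one bounding-box
-- interval check computed upfront, instead of A's per-translation rescan of every square with
-- an early break; return values agree on all of Pre_.

-- ===== PORT A =====

-- Tetris.vectores_possibilities (shared module constant; both Pythons carry the same literal list)
def pvVectors : List (List Int) :=
  [[0,1],[0,2],[0,3],[0,4],
   [1,0],[1,1],[1,2],[1,3],[1,4],
   [2,0],[2,1],[2,2],[2,3],[2,4],
   [3,0],[3,1],[3,2],[3,3],[3,4],
   [4,0],[4,1],[4,2],[4,3],[4,4],
   [-1,0],[-1,1],[-1,2],[-1,3],[-1,4],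
   [-2,0],[-2,1],[-2,2],[-2,3],[-2,4],
   [-3,0],[-3,1],[-3,2],[-3,3],[-3,4],
   [-4,0],[-4,1],[-4,2],[-4,3],[-4,4]]

-- A's first inner loop: x = square[0] + vector[0], y = square[1] + vector[1], break on out of range.
-- square[0]/square[1] ported with pyGetD (Pre_ guarantees every square has length ≥ 2, so the default is never taken).
def pvLoopAdd : List (List Int) → Int → Int → List (List Int) → List (List Int) × Bool
  | [], _, _, acc => (acc, true)
  | s :: rest, vx, vy, acc =>
    let x := PySem.List.pyGetD s 0 0 + vx
    let y := PySem.List.pyGetD s 1 0 + vy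
    if x < 0 ∨ x ≥ 6 ∨ y ≥ 6 ∨ y < 0 then (acc, false)
    else pvLoopAdd rest vx vy (acc ++ [[x, y]])

-- A's second inner loop: x = square[0] - vector[0], y = square[1] - vector[1].
def pvLoopSub : List (List Int) → Int → Int → List (List Int) → List (List Int) × Bool
  | [], _, _, acc => (acc, true)
  | s :: rest, vx, vy, acc =>
    let x := PySem.List.pyGetD s 0 0 - vx
    let y := PySem.List.pyGetD s 1 0 - vy
    if x < 0 ∨ x ≥ 6 ∨ y ≥ 6 ∨ y < 0 then (acc, false)
    else pvLoopSub rest vx vy (acc ++ [[x, y]])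

def get_all_possibilities_positions (piece : Option (List (List Int))) : Option (List (List (List Int))) :=
  match piece with
  | none => none
  | some p =>
    some (pvVectors.foldl (fun positions vector =>
      let vx := PySem.List.pyGetD vector 0 0
      let vy := PySem.List.pyGetD vector 1 0
      let r1 := pvLoopAdd p vx vy []
      let positions := if r1.2 = true then positions ++ [r1.1] else positions
      let r2 := pvLoopSub p vx vy []
      if r2.2 = true then positions ++ [r2.1] else positions) [p])

-- ===== PORT B =====

def get_all_possibilities_positions_alt (piece : Option (List (List Int))) : Option (List (List (List Int))) :=
  match piece with
  | none => none
  | some p =>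
    -- bounding box computed once (only used when p ≠ [], exactly as in Source B)
    let minx := (PySem.List.min? (p.map fun s => PySem.List.pyGetD s 0 0) (fun x => x)).getD 0
    let maxx := (PySem.List.max? (p.map fun s => PySem.List.pyGetD s 0 0) (fun x => x)).getD 0
    let miny := (PySem.List.min? (p.map fun s => PySem.List.pyGetD s 1 0) (fun x => x)).getD 0
    let maxy := (PySem.List.max? (p.map fun s => PySem.List.pyGetD s 1 0) (fun x => x)).getD 0
    some (pvVectors.foldl (fun positions vector =>
      [(1 : Int), -1].foldl (fun positions sign =>
        let dx := sign * PySem.List.pyGetD vector 0 0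
        let dy := sign * PySem.List.pyGetD vector 1 0
        if p ≠ [] ∧ ¬(0 ≤ minx + dx ∧ maxx + dx < 6 ∧ 0 ≤ miny + dy ∧ maxy + dy < 6) then positions
        else positions ++ [p.map fun s => [PySem.List.pyGetD s 0 0 + dx, PySem.List.pyGetD s 1 0 + dy]]) positions) [p])

-- ===== PRECONDITION & SPEC =====
-- Pre_ excludes pieces containing a square of length < 2: on almost all of those A raises
-- IndexError, and B (which reads every square's two coordinates up front) raises on all of them.
def Pre_get_all_possibilities_positions (piece : Option (List (List Int))) : Prop :=
  ∀ s ∈ piece.getD [], 2 ≤ s.length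

instance (piece : Option (List (List Int))) : Decidable (Pre_get_all_possibilities_positions piece) := by
  unfold Pre_get_all_possibilities_positions; infer_instance

def pvWitness_get_all_possibilities_positions : Option (List (List Int)) := some [[2, 3], [2, 4]]

def Spec_get_all_possibilities_positions (piece : Option (List (List Int))) (out : Option (List (List (List Int)))) : Prop := out = get_all_possibilities_positions_alt piece
instance (piece : Option (List (List Int))) (out : Option (List (List (List Int)))) : Decidable (Spec_get_all_possibilities_positions piece out) := by unfold Spec_get_all_possibilities_positions; infer_instance

-- ===== CLAIM (what is proved, stated in full; the proofs are below) =====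
def Claim_equal_get_all_possibilities_positions : Prop := ∀ (piece : Option (List (List Int))), Dom_get_all_possibilities_positions piece → Pre_get_all_possibilities_positions piece → Spec_get_all_possibilities_positions piece (get_all_possibilities_positions piece)

-- ===== LEMMAS AND PROOFS =====

-- the translated square, and the in-bounds predicate A checks square by square
def pvTr (dx dy : Int) (s : List Int) : List Int :=
  [PySem.List.pyGetD s 0 0 + dx, PySem.List.pyGetD s 1 0 + dy]

abbrev pvInB (dx dy : Int) (s : List Int) : Prop :=
  0 ≤ PySem.List.pyGetD s 0 0 + dx ∧ PySem.List.pyGetD s 0 0 + dx < 6 ∧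
  0 ≤ PySem.List.pyGetD s 1 0 + dy ∧ PySem.List.pyGetD s 1 0 + dy < 6

-- common step both ports reduce to
def pvG (p : List (List Int)) (dx dy : Int) (L : List (List (List Int))) : List (List (List Int)) :=
  if ∀ s ∈ p, pvInB dx dy s then L ++ [p.map (pvTr dx dy)] else L

lemma pvLoopAdd_all (p : List (List Int)) (dx dy : Int) (acc : List (List Int))
    (h : ∀ s ∈ p, pvInB dx dy s) :
    pvLoopAdd p dx dy acc = (acc ++ p.map (pvTr dx dy), true) := by
  induction p generalizing acc with
  | nil => simp [pvLoopAdd]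
  | cons s rest ih =>
    have hs := h s (by simp)
    simp only [pvLoopAdd]
    rw [if_neg (by unfold pvInB at hs; omega)]
    rw [ih _ (fun t ht => h t (by simp [ht]))]
    simp [pvTr]

lemma pvLoopAdd_bad (p : List (List Int)) (dx dy : Int) (acc : List (List Int))
    (h : ¬ ∀ s ∈ p, pvInB dx dy s) :
    (pvLoopAdd p dx dy acc).2 = false := by
  induction p generalizing acc with
  | nil => simp at h
  | cons s rest ih =>
    simp only [pvLoopAdd]
    by_cases hs : pvInB dx dy s
    · rw [if_neg (by unfold pvInB at hs; omega)]
      exact ih _ (by simpa [hs] using h)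
    · rw [if_pos (by unfold pvInB at hs; omega)]

lemma pvLoopSub_eq_add (p : List (List Int)) (vx vy : Int) (acc : List (List Int)) :
    pvLoopSub p vx vy acc = pvLoopAdd p (-vx) (-vy) acc := by
  induction p generalizing acc with
  | nil => simp [pvLoopSub, pvLoopAdd]
  | cons s rest ih =>
    simp only [pvLoopSub, pvLoopAdd, sub_eq_add_neg]
    split_ifs <;> simp [ih]

lemma stepA_add (p : List (List Int)) (dx dy : Int) (L : List (List (List Int))) :
    (if (pvLoopAdd p dx dy []).2 = true then L ++ [(pvLoopAdd p dx dy []).1] else L)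
      = pvG p dx dy L := by
  unfold pvG
  by_cases h : ∀ s ∈ p, pvInB dx dy s
  · rw [pvLoopAdd_all p dx dy [] h, if_pos h]; simp
  · rw [pvLoopAdd_bad p dx dy [] h, if_neg h]; simp

lemma stepA_sub (p : List (List Int)) (vx vy : Int) (L : List (List (List Int))) :
    (if (pvLoopSub p vx vy []).2 = true then L ++ [(pvLoopSub p vx vy []).1] else L)
      = pvG p (-vx) (-vy) L := by
  rw [pvLoopSub_eq_add]; exact stepA_add p (-vx) (-vy) L

-- the bounding-box check equals the per-square check on a nonempty piece
lemma bbox_iff (p : List (List Int)) (hp : p ≠ []) (dx dy : Int) :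
    (0 ≤ (PySem.List.min? (p.map fun s => PySem.List.pyGetD s 0 0) (fun x => x)).getD 0 + dx ∧
     (PySem.List.max? (p.map fun s => PySem.List.pyGetD s 0 0) (fun x => x)).getD 0 + dx < 6 ∧
     0 ≤ (PySem.List.min? (p.map fun s => PySem.List.pyGetD s 1 0) (fun x => x)).getD 0 + dy ∧
     (PySem.List.max? (p.map fun s => PySem.List.pyGetD s 1 0) (fun x => x)).getD 0 + dy < 6)
      ↔ (∀ s ∈ p, pvInB dx dy s) := by
  have hxs : (p.map fun s => PySem.List.pyGetD s 0 0) ≠ [] := by simpa using hp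
  have hys : (p.map fun s => PySem.List.pyGetD s 1 0) ≠ [] := by simpa using hp
  obtain ⟨mx, hmx⟩ : ∃ m, PySem.List.min? (p.map fun s => PySem.List.pyGetD s 0 0) (fun x => x) = some m := by
    cases h : PySem.List.min? (p.map fun s => PySem.List.pyGetD s 0 0) (fun x => x) with
    | none => exact absurd ((PySem.List.min?_eq_none_iff _ _).mp h) hxs
    | some m => exact ⟨m, rfl⟩
  obtain ⟨Mx, hMx⟩ : ∃ m, PySem.List.max? (p.map fun s => PySem.List.pyGetD s 0 0) (fun x => x) = some m := by
    cases h : PySem.List.max? (p.map fun s => PySem.List.pyGetD s 0 0) (fun x => x) with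
    | none => exact absurd ((PySem.List.max?_eq_none_iff _ _).mp h) hxs
    | some m => exact ⟨m, rfl⟩
  obtain ⟨my, hmy⟩ : ∃ m, PySem.List.min? (p.map fun s => PySem.List.pyGetD s 1 0) (fun x => x) = some m := by
    cases h : PySem.List.min? (p.map fun s => PySem.List.pyGetD s 1 0) (fun x => x) with
    | none => exact absurd ((PySem.List.min?_eq_none_iff _ _).mp h) hys
    | some m => exact ⟨m, rfl⟩
  obtain ⟨My, hMy⟩ : ∃ m, PySem.List.max? (p.map fun s => PySem.List.pyGetD s 1 0) (fun x => x) = some m := by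
    cases h : PySem.List.max? (p.map fun s => PySem.List.pyGetD s 1 0) (fun x => x) with
    | none => exact absurd ((PySem.List.max?_eq_none_iff _ _).mp h) hys
    | some m => exact ⟨m, rfl⟩
  rw [hmx, hMx, hmy, hMy]
  simp only [Option.getD_some]
  constructor
  · rintro ⟨h1, h2, h3, h4⟩ s hs
    have hxle := PySem.List.min?_isMin hmx _ (List.mem_map_of_mem hs)
    have hxge := PySem.List.max?_isMax hMx _ (List.mem_map_of_mem hs)
    have hyle := PySem.List.min?_isMin hmy _ (List.mem_map_of_mem hs)
    have hyge := PySem.List.max?_isMax hMy _ (List.mem_map_of_mem hs)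
    unfold pvInB
    simp only at hxle hxge hyle hyge
    omega
  · intro h
    obtain ⟨smx, hsmx, hvmx⟩ := List.mem_map.mp (PySem.List.min?_mem hmx)
    obtain ⟨sMx, hsMx, hvMx⟩ := List.mem_map.mp (PySem.List.max?_mem hMx)
    obtain ⟨smy, hsmy, hvmy⟩ := List.mem_map.mp (PySem.List.min?_mem hmy)
    obtain ⟨sMy, hsMy, hvMy⟩ := List.mem_map.mp (PySem.List.max?_mem hMy)
    have h1 := h smx hsmx; have h2 := h sMx hsMx
    have h3 := h smy hsmy; have h4 := h sMy hsMy
    unfold pvInB at h1 h2 h3 h4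
    omega

lemma stepB (p : List (List Int)) (dx dy : Int) (L : List (List (List Int))) :
    (if p ≠ [] ∧ ¬(0 ≤ (PySem.List.min? (p.map fun s => PySem.List.pyGetD s 0 0) (fun x => x)).getD 0 + dx ∧
                   (PySem.List.max? (p.map fun s => PySem.List.pyGetD s 0 0) (fun x => x)).getD 0 + dx < 6 ∧
                   0 ≤ (PySem.List.min? (p.map fun s => PySem.List.pyGetD s 1 0) (fun x => x)).getD 0 + dy ∧
                   (PySem.List.max? (p.map fun s => PySem.List.pyGetD s 1 0) (fun x => x)).getD 0 + dy < 6)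
     then L
     else L ++ [p.map fun s => [PySem.List.pyGetD s 0 0 + dx, PySem.List.pyGetD s 1 0 + dy]])
      = pvG p dx dy L := by
  by_cases hp : p = []
  · subst hp; simp [pvG]
  · rw [pvG]
    by_cases hok : ∀ s ∈ p, pvInB dx dy s
    · rw [if_pos hok, if_neg (by rw [not_and_or]; right; rw [not_not, bbox_iff p hp dx dy]; exact hok)]
      rfl
    · rw [if_neg hok, if_pos ⟨hp, by rw [bbox_iff p hp dx dy]; exact hok⟩]

-- ===== VERDICT (by name: the statement is the Claim_ definition above) =====
theorem get_all_possibilities_positions_spec : Claim_equal_get_all_possibilities_positions := by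
  intro piece _ _
  unfold Spec_get_all_possibilities_positions
  cases piece with
  | none => rfl
  | some p =>
    simp only [get_all_possibilities_positions, get_all_possibilities_positions_alt,
      pvVectors, List.foldl_cons, List.foldl_nil, stepA_add, stepA_sub, stepB]
    norm_num [PySem.List.pyGetD]
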